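-- pv_equiv track=rewrite | github.com/planonicolas/DriverDrowsinessDetection | drowsiness detection model/LSTM model/model.py | label_for_windowing
-- ===== SOURCE A (Python) =====
-- TIME_STEPS = 90
--
-- SCROLLING = 10
--
-- def label_for_windowing(labels, n=TIME_STEPS, scrolling = SCROLLING):
--     if(n == scrolling):
--         return labels[(n-1):]
--
--     labels_ret = []
--     first = False
--
--     for i in range(len(labels)):
--         if(first):
--             if(i%scrolling == 0):
--                 labels_ret.append(labels[i])
--
--         if i == n-1:
--             labels_ret.append(labels[i])
--             first = True
--
--     return labels_ret
-- ===== SOURCE B (Python) =====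
-- TIME_STEPS = 90
--
-- SCROLLING = 10
--
-- def label_for_windowing(labels, n=TIME_STEPS, scrolling=SCROLLING):
--     if n == scrolling:
--         return labels[(n-1):]
--     if not (0 <= n - 1 < len(labels)):
--         return []
--     s = abs(scrolling)
--     start = ((n + s - 1) // s) * s   # smallest multiple of |scrolling| that is >= n
--     return [labels[n - 1]] + labels[start::s]
-- ===== Notes on version B (the rewrite author's own statement) =====
-- stated objective: simpler
-- what changed: A's whole-list scan carrying a 'first' flag and testing every index is replaced by a range guard plus one direct strided slice labels[start::|scrolling|] from the first multiple of |scrolling| at or after n (the slice touches only every |scrolling|-th element instead of all of them).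
-- outside the precondition, e.g. on label_for_windowing([1], 1, 0): A returns [1], B raises ZeroDivisionError; on label_for_windowing([5, 6], 2, 0): A returns [6], B raises ZeroDivisionError
import Mathlib
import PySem

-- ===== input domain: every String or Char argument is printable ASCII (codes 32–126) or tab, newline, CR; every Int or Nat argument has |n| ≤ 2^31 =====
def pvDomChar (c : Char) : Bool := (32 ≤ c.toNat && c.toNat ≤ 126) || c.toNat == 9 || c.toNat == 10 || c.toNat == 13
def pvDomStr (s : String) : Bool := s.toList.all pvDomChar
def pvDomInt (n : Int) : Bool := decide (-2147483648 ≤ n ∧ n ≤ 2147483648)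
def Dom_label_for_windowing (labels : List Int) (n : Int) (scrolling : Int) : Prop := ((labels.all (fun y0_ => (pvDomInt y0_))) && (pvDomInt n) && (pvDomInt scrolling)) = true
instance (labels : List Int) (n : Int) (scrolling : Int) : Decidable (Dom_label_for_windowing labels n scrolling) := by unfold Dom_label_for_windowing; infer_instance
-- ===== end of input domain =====

-- B replaces A's whole-list scan with a first flag by an out-of-range guard plus one direct strided
-- slice from the first multiple of |scrolling| at/after n (objective: simpler).


-- ===== PORT A =====
-- loop body of A's 'for i in range(len(labels))' (i is always in range, so labels[i] = labels.getD i 0)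
def pvStepA (labels : List Int) (n : Int) (scrolling : Int) (acc : List Int × Bool) (i : Nat) : List Int × Bool :=
  let acc1 := if acc.2 = true ∧ PySem.Int.mod (i : Int) scrolling = 0 then (acc.1 ++ [labels.getD i 0], acc.2) else acc
  if (i : Int) = n - 1 then (acc1.1 ++ [labels.getD i 0], true) else acc1

def label_for_windowing (labels : List Int) (n : Int) (scrolling : Int) : List Int :=
  if n = scrolling then PySem.List.slice labels (some (n - 1)) none
  else ((List.range labels.length).foldl (pvStepA labels n scrolling) ([], false)).1

-- ===== PORT B =====
def label_for_windowing_alt (labels : List Int) (n : Int) (scrolling : Int) : List Int :=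
  if n = scrolling then PySem.List.slice labels (some (n - 1)) none
  else if ¬ (0 ≤ n - 1 ∧ n - 1 < (labels.length : Int)) then []
  else
    let s : Int := scrolling.natAbs
    let start := PySem.Int.floordiv (n + s - 1) s * s
    PySem.List.pyGetD labels (n - 1) 0 :: (PySem.List.slice? labels (some start) none s).getD []

-- ===== PRECONDITION & SPEC =====
-- Pre_ excludes scrolling = 0 with n ≠ scrolling: there A's 'i % scrolling' raises ZeroDivisionError
-- on every list long enough to reach an index past n-1 (and B's division by |scrolling| raises too);
-- on the remaining degenerate short lists A happens to return before dividing while B still raises.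
def Pre_label_for_windowing (labels : List Int) (n : Int) (scrolling : Int) : Prop :=
  n = scrolling ∨ scrolling ≠ 0
instance (labels : List Int) (n : Int) (scrolling : Int) : Decidable (Pre_label_for_windowing labels n scrolling) := by unfold Pre_label_for_windowing; infer_instance
def pvWitness_label_for_windowing : List Int × Int × Int := ([10, 20, 30, 40, 50], 2, 2)

def Spec_label_for_windowing (labels : List Int) (n : Int) (scrolling : Int) (out : List Int) : Prop := out = label_for_windowing_alt labels n scrolling
instance (labels : List Int) (n : Int) (scrolling : Int) (out : List Int) : Decidable (Spec_label_for_windowing labels n scrolling out) := by unfold Spec_label_for_windowing; infer_instance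

-- ===== CLAIM (what is proved, stated in full; the proofs are below) =====
def Claim_equal_label_for_windowing : Prop := ∀ (labels : List Int) (n : Int) (scrolling : Int), Dom_label_for_windowing labels n scrolling → Pre_label_for_windowing labels n scrolling → Spec_label_for_windowing labels n scrolling (label_for_windowing labels n scrolling)


-- ===== LEMMAS AND PROOFS =====

-- the values A's loop picks up after the flag is set: indices past n-1 divisible by scrolling
def pvPick (labels : List Int) (n : Int) (scrolling : Int) (L : Nat) : List Int :=
  ((List.range L).filter (fun (i : Nat) => decide ((n - 1 : Int) < (i : Int)) && decide (PySem.Int.mod (i : Int) scrolling = 0))).map (fun i => labels.getD i 0)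

theorem pvPick_succ (labels : List Int) (n scrolling : Int) (L : Nat) :
    pvPick labels n scrolling (L + 1) =
      pvPick labels n scrolling L ++
        (if (n - 1 : Int) < (L : Int) ∧ PySem.Int.mod (L : Int) scrolling = 0 then [labels.getD L 0] else []) := by
  unfold pvPick
  rw [List.range_succ, List.filter_append, List.map_append]
  congr 1
  rw [List.filter_cons, List.filter_nil]
  by_cases h : (n - 1 : Int) < (L : Int) ∧ PySem.Int.mod (L : Int) scrolling = 0
  · rw [if_pos (by simp [h.1, h.2]), if_pos h]
    rfl
  · rw [if_neg (by simp only [Bool.and_eq_true, decide_eq_true_eq]; exact h), if_neg h]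
    rfl

-- characterization of A's loop state after scanning range L
theorem pvLoopA (labels : List Int) (n scrolling : Int) (L : Nat) :
    (List.range L).foldl (pvStepA labels n scrolling) ([], false) =
      if 0 ≤ n - 1 ∧ n - 1 < (L : Int) then ((labels.getD (n - 1).toNat 0) :: pvPick labels n scrolling L, true)
      else ([], false) := by
  induction L with
  | zero =>
    have h : ¬ (0 ≤ n - 1 ∧ n - 1 < ((0 : Nat) : Int)) := by push_cast; omega
    simp
  | succ L ih =>
    rw [List.range_succ, List.foldl_append, ih, List.foldl_cons, List.foldl_nil]
    by_cases h1 : 0 ≤ n - 1 ∧ n - 1 < (L : Int)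
    · have h1' : 0 ≤ n - 1 ∧ n - 1 < ((L + 1 : Nat) : Int) := by push_cast; push_cast at h1; omega
      rw [if_pos h1, if_pos h1']
      have hne : ¬ ((L : Int) = n - 1) := by omega
      rw [pvPick_succ]
      by_cases h2 : PySem.Int.mod (L : Int) scrolling = 0
      · simp [pvStepA, hne, h2, h1.2]
      · simp [pvStepA, hne, h2]
    · rw [if_neg h1]
      by_cases heq : (L : Int) = n - 1
      · have h1' : 0 ≤ n - 1 ∧ n - 1 < ((L + 1 : Nat) : Int) := by push_cast; omega
        rw [if_pos h1']
        have hm : (n - 1).toNat = L := by omega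
        have hpick : pvPick labels n scrolling (L + 1) = [] := by
          unfold pvPick
          rw [List.filter_eq_nil_iff.mpr, List.map_nil]
          intro i hi
          have : i < L + 1 := List.mem_range.mp hi
          simp only [Bool.and_eq_true, decide_eq_true_eq, not_and]
          intro hlt
          exfalso; omega
        rw [hpick, hm]
        simp [pvStepA, heq]
      · have h1' : ¬ (0 ≤ n - 1 ∧ n - 1 < ((L + 1 : Nat) : Int)) := by push_cast; push_cast at h1; omega
        rw [if_neg h1']
        simp [pvStepA, heq]

-- ceiling-division bracket used for the strided count
theorem pvCeil (k b s' : Nat) (hs : 0 < s') : k < (b + s' - 1) / s' ↔ s' * k < b := by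
  constructor
  · intro h
    have h2 : (k + 1) * s' ≤ b + s' - 1 := (Nat.le_div_iff_mul_le hs).mp h
    rw [Nat.succ_mul] at h2
    have := Nat.mul_comm k s'
    omega
  · intro h
    apply (Nat.le_div_iff_mul_le hs).mpr
    rw [Nat.succ_mul]
    have := Nat.mul_comm k s'
    omega

-- index form: the filtered indices are exactly the strided arithmetic progression
theorem pvIdx (m s' L : Nat) (hs : 0 < s') :
    (List.range L).filter (fun (i : Nat) => decide ((m : Nat) < i) && decide (s' ∣ i)) =
      (List.range ((L - ((m + s') / s') * s' + s' - 1) / s')).map (fun k => ((m + s') / s') * s' + s' * k) := by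
  have hst : (m + s') / s' = m / s' + 1 := Nat.add_div_right m hs
  have hmlt : m < ((m + s') / s') * s' := by
    rw [hst, Nat.succ_mul]
    have h1 := Nat.div_add_mod m s'
    have h2 : m % s' < s' := Nat.mod_lt m hs
    have := Nat.mul_comm (m / s') s'
    omega
  have hdvd : s' ∣ ((m + s') / s') * s' := ⟨(m + s') / s', Nat.mul_comm _ _⟩
  -- set st := the first multiple of s' past m
  set st := ((m + s') / s') * s' with hstdef
  set cnt := (L - st + s' - 1) / s' with hcntdef
  have hmem : ∀ x, x ∈ (List.range L).filter (fun (i : Nat) => decide ((m : Nat) < i) && decide (s' ∣ i)) ↔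
      x ∈ (List.range cnt).map (fun k => st + s' * k) := by
    intro x
    simp only [List.mem_filter, List.mem_range, List.mem_map, Bool.and_eq_true, decide_eq_true_eq]
    constructor
    · rintro ⟨hxL, hmx, q, hq⟩
      -- x = s' * q, m < x, x < L
      have hqle : m / s' + 1 ≤ q := by
        by_contra hcon
        have : q ≤ m / s' := by omega
        have : s' * q ≤ s' * (m / s') := Nat.mul_le_mul_left s' this
        have h1 := Nat.div_add_mod m s'
        omega
      refine ⟨q - (m / s' + 1), ?_, ?_⟩
      · -- q - (m/s'+1) < cnt
        rw [hcntdef, pvCeil _ _ _ hs]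
        have hsplit : s' * q = st + s' * (q - (m / s' + 1)) := by
          rw [hstdef, hst]
          have : (m / s' + 1) + (q - (m / s' + 1)) = q := by omega
          calc s' * q = s' * ((m / s' + 1) + (q - (m / s' + 1))) := by rw [this]
            _ = s' * (m / s' + 1) + s' * (q - (m / s' + 1)) := by ring
            _ = (m / s' + 1) * s' + s' * (q - (m / s' + 1)) := by rw [Nat.mul_comm s' (m / s' + 1)]
        omega
      · -- st + s' * (q - (m/s'+1)) = x
        rw [hstdef, hst]
        have : (m / s' + 1) + (q - (m / s' + 1)) = q := by omega
        calc (m / s' + 1) * s' + s' * (q - (m / s' + 1))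
            = s' * (m / s' + 1) + s' * (q - (m / s' + 1)) := by rw [Nat.mul_comm (m / s' + 1) s']
          _ = s' * ((m / s' + 1) + (q - (m / s' + 1))) := by ring
          _ = s' * q := by rw [this]
          _ = x := hq.symm
    · rintro ⟨k, hk, rfl⟩
      rw [hcntdef, pvCeil _ _ _ hs] at hk
      exact ⟨show st + s' * k < L by omega, show m < st + s' * k by omega,
        show s' ∣ st + s' * k from Dvd.dvd.add hdvd ⟨k, rfl⟩⟩
  have hnd1 : ((List.range L).filter (fun (i : Nat) => decide ((m : Nat) < i) && decide (s' ∣ i))).Nodup :=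
    (List.nodup_range).filter _
  have hnd2 : ((List.range cnt).map (fun k => st + s' * k)).Nodup := by
    refine (List.nodup_range).map ?_
    intro a b hab
    have hab' : st + s' * a = st + s' * b := hab
    have : s' * a = s' * b := by omega
    exact Nat.eq_of_mul_eq_mul_left hs this
  have hp1 : ((List.range L).filter (fun (i : Nat) => decide ((m : Nat) < i) && decide (s' ∣ i))).Pairwise (· < ·) :=
    List.Pairwise.sublist List.filter_sublist List.pairwise_lt_range
  have hp2 : ((List.range cnt).map (fun k => st + s' * k)).Pairwise (· < ·) := by
    refine List.Pairwise.map _ ?_ (List.pairwise_lt_range)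
    intro a b hab
    have : s' * a < s' * b := (Nat.mul_lt_mul_left hs).mpr hab
    omega
  have hperm := (List.perm_ext_iff_of_nodup hnd1 hnd2).mpr hmem
  exact List.Perm.eq_of_pairwise (fun a b _ _ h1 h2 => le_antisymm h1 h2)
    (List.Pairwise.imp le_of_lt hp1) (List.Pairwise.imp le_of_lt hp2) hperm

-- turn a filterMap whose function always hits into a map
theorem pvFilterMapMap {α β : Type} (f : α → Option β) (g : α → β) (l : List α)
    (h : ∀ x ∈ l, f x = some (g x)) : l.filterMap f = l.map g := by
  induction l with
  | nil => rfl
  | cons a t ih =>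
    rw [List.filterMap_cons, List.map_cons, h a (by simp), ih (fun x hx => h x (by simp [hx]))]

-- B's strided slice equals the values A's loop picks after the flag
theorem pvTail (labels : List Int) (n scrolling : Int) (hs : scrolling ≠ 0)
    (hr : 0 ≤ n - 1 ∧ n - 1 < (labels.length : Int)) :
    (PySem.List.slice? labels
        (some (PySem.Int.floordiv (n + (scrolling.natAbs : Int) - 1) (scrolling.natAbs : Int) * (scrolling.natAbs : Int)))
        none (scrolling.natAbs : Int)).getD []
      = pvPick labels n scrolling labels.length := by
  have hs' : 0 < scrolling.natAbs := Int.natAbs_pos.mpr hs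
  set s' := scrolling.natAbs with hsdef
  set m := (n - 1).toNat with hmdef
  have hn : n = (m : Int) + 1 := by omega
  have hmL : m < labels.length := by omega
  -- the Int start is the Nat start
  have hstart : PySem.Int.floordiv (n + (s' : Int) - 1) (s' : Int) * (s' : Int)
      = ((((m + s') / s') * s' : Nat) : Int) := by
    rw [PySem.Int.floordiv_eq_ediv_of_pos (by exact_mod_cast hs')]
    rw [hn]
    have : (m : Int) + 1 + (s' : Int) - 1 = ((m + s' : Nat) : Int) := by push_cast; ring
    rw [this]
    push_cast [Int.natCast_div]
    ring
  rw [hstart]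
  set st := ((m + s') / s') * s' with hstdef
  -- pvPick as the strided map, via pvIdx
  have hpred : ∀ i ∈ List.range labels.length,
      (decide ((n - 1 : Int) < (i : Int)) && decide (PySem.Int.mod (i : Int) scrolling = 0))
        = (decide ((m : Nat) < i) && decide (s' ∣ i)) := by
    intro i _
    have e1 : ((n - 1 : Int) < (i : Int)) ↔ ((m : Nat) < i) := by omega
    have e2 : (PySem.Int.mod (i : Int) scrolling = 0) ↔ (s' ∣ i) := by
      rw [PySem.Int.mod_eq_zero_iff_dvd]
      rw [hsdef, ← Int.natAbs_dvd]
      exact_mod_cast Iff.symm Int.natCast_dvd_natCast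
    rw [decide_eq_decide.mpr e1, decide_eq_decide.mpr e2]
  have hpick : pvPick labels n scrolling labels.length
      = ((List.range ((labels.length - st + s' - 1) / s')).map (fun k => st + s' * k)).map
          (fun i => labels.getD i 0) := by
    unfold pvPick
    rw [List.filter_congr hpred, pvIdx m s' labels.length hs']
  rw [hpick, List.map_map]
  set cnt := (labels.length - st + s' - 1) / s' with hcntdef
  -- unfold the slice
  have hs0 : ¬ ((s' : Int) = 0) := by omega
  by_cases hcase : st < labels.length
  · have hcnt' : ∀ k, k < cnt → st + s' * k < labels.length := by
      intro k hk
      rw [hcntdef, pvCeil _ _ _ hs'] at hk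
      omega
    have hslice : PySem.List.slice? labels (some ((st : Nat) : Int)) none ((s' : Nat) : Int)
        = some ((List.range cnt).filterMap (fun k => labels[(((st : Nat) : Int) + ((s' : Nat) : Int) * (k : Nat)).toNat]?)) := by
      simp only [PySem.List.slice?, PySem.List.sliceIndices, hs0, if_false]
      have hneg : ¬ ((s' : Int) < 0) := by omega
      have hstnneg : ¬ (((st : Nat) : Int) < 0) := by omega
      have hpos : (0 : Int) < (s' : Int) := by exact_mod_cast hs'
      have hmin : min ((st : Nat) : Int) ((labels.length : Nat) : Int) = ((st : Nat) : Int) := by omega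
      have hlt : ((st : Nat) : Int) < ((labels.length : Nat) : Int) := by exact_mod_cast hcase
      have hcnteq : ((((labels.length : Nat) : Int) - ((st : Nat) : Int) + (s' : Int) - 1) / (s' : Int)).toNat = cnt := by
        have : (((labels.length : Nat) : Int) - ((st : Nat) : Int) + (s' : Int) - 1)
            = (((labels.length - st + s' - 1 : Nat)) : Int) := by omega
        rw [this, ← Int.natCast_div, Int.toNat_natCast, hcntdef]
      simp only [hneg, if_false, hstnneg, hmin, hpos, if_true, hlt, hcnteq]
    rw [hslice, Option.getD_some]
    apply pvFilterMapMap
    intro k hk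
    simp only [Function.comp_apply]
    have hkc : k < cnt := List.mem_range.mp hk
    have hin := hcnt' k hkc
    have hidx : ((((st : Nat) : Int) + ((s' : Nat) : Int) * (k : Nat)).toNat) = st + s' * k := by
      omega
    rw [hidx]
    rw [List.getElem?_eq_getElem hin, List.getD_eq_getElem labels 0 hin]
  · -- start at or past the end: both sides are empty
    have hcnt0 : cnt = 0 := by
      have hls : labels.length - st = 0 := by omega
      rw [hcntdef, hls]
      exact Nat.div_eq_of_lt (by omega)
    have hslice : PySem.List.slice? labels (some ((st : Nat) : Int)) none ((s' : Nat) : Int) = some [] := by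
      simp only [PySem.List.slice?, PySem.List.sliceIndices, hs0, if_false]
      have hneg : ¬ ((s' : Int) < 0) := by omega
      have hstnneg : ¬ (((st : Nat) : Int) < 0) := by omega
      have hpos : (0 : Int) < (s' : Int) := by exact_mod_cast hs'
      have hmin : min ((st : Nat) : Int) ((labels.length : Nat) : Int) = ((labels.length : Nat) : Int) := by omega
      have hlt : ¬ (((labels.length : Nat) : Int) < ((labels.length : Nat) : Int)) := lt_irrefl _
      simp only [hneg, if_false, hstnneg, hmin, hpos, if_true, hlt, List.range_zero, List.filterMap_nil]
    rw [hslice, Option.getD_some, hcnt0]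
    simp

-- ===== VERDICT (by name: the statement is the Claim_ definition above) =====
theorem label_for_windowing_spec : Claim_equal_label_for_windowing := by
  intro labels n scrolling _ hpre
  unfold Spec_label_for_windowing
  by_cases hns : n = scrolling
  · simp [label_for_windowing, label_for_windowing_alt, hns]
  have hs : scrolling ≠ 0 := hpre.resolve_left hns
  simp only [label_for_windowing, label_for_windowing_alt, if_neg hns]
  rw [pvLoopA]
  by_cases hr : 0 ≤ n - 1 ∧ n - 1 < (labels.length : Int)
  · rw [if_pos hr, if_neg (not_not_intro hr)]
    have hhead : labels.getD (n - 1).toNat 0 = PySem.List.pyGetD labels (n - 1) 0 :=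
      (PySem.List.pyGetD_of_nonneg labels 0 hr.1).symm
    rw [hhead, ← pvTail labels n scrolling hs hr]
  · rw [if_neg hr, if_pos hr]
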